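-- pv_equiv track=rewrite | github.com/mr-horror-harry/Horror_Skillrack | 112023/04112023/SolnDT.py | maxDigSum
-- ===== SOURCE A (Python) =====
-- def maxDigSum(li) -> int:
--     res=0
--     for i in li:
--         mx=0
--         while i>0:
--             if i%10 > mx:
--                 mx=i%10
--             i//=10
--         res+=mx
--     return res
-- ===== SOURCE B (Python) =====
-- def maxDigSum(li) -> int:
--     return sum(max(int(c) for c in str(i)) for i in li if i > 0)
-- ===== Notes on version B (the rewrite author's own statement) =====
-- stated objective: idiomatic
-- what changed: Replaces the explicit accumulator loops and arithmetic %10/÷10 digit extraction by a one-line generator expression that takes the max over the decimal-string characters of each positive element.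
import Mathlib
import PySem

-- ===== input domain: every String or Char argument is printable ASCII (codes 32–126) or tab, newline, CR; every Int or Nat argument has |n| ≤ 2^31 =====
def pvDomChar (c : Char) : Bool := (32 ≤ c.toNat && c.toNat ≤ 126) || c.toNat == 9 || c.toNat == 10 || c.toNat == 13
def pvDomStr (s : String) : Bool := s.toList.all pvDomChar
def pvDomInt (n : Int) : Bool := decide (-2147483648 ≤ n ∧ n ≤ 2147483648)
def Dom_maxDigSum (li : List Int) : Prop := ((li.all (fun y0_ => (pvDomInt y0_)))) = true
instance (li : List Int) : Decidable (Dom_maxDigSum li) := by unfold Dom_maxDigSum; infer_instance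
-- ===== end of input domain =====

-- B replaces the explicit accumulator loops and %10/÷10 digit extraction by a
-- sum over string-representation digit maxima (idiomatic one-liner); same cost.


-- ===== PORT A =====
-- A's inner while loop: mx <- i%10 when larger, i <- i//10, while i > 0
def innerA (i mx : Int) : Int :=
  if h : 0 < i then
    innerA (PySem.Int.floordiv i 10)
      (if PySem.Int.mod i 10 > mx then PySem.Int.mod i 10 else mx)
  else mx
  termination_by i.toNat
  decreasing_by
    simp only [PySem.Int.floordiv_eq_ediv_of_pos (by norm_num : (0:Int) < 10)]
    omega

def maxDigSum (li : List Int) : Int :=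
  li.foldl (fun res i => res + innerA i 0) 0

-- ===== PORT B =====
-- int(c): exact for the digit characters str(i) yields when i > 0
def digitVal (c : Char) : Int := (c.toNat : Int) - 48

-- max(int(c) for c in str(i)); the sequence is nonempty for i > 0, so .getD 0
-- only makes the port total and is never reached on the inputs B uses it for
def maxDigitOf (i : Int) : Int :=
  (((PySem.Int.toChars i).map digitVal).max?).getD 0

def maxDigSum_alt (li : List Int) : Int :=
  ((li.filter (fun i => decide (0 < i))).map maxDigitOf).sum

-- ===== PRECONDITION & SPEC =====
def Spec_maxDigSum (li : List Int) (out : Int) : Prop := out = maxDigSum_alt li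
instance (li : List Int) (out : Int) : Decidable (Spec_maxDigSum li out) := by unfold Spec_maxDigSum; infer_instance

-- ===== CLAIM (what is proved, stated in full; the proofs are below) =====
def Claim_equal_maxDigSum : Prop := ∀ (li : List Int), Dom_maxDigSum li → Spec_maxDigSum li (maxDigSum li)

-- ===== LEMMAS AND PROOFS =====

-- arithmetic max-digit reference function
def mref (n : Nat) : Nat :=
  if n = 0 then 0 else max (n % 10) (mref (n / 10))
  decreasing_by omega

-- fuel-free form of Nat.toDigits 10
def rep (n : Nat) : List Char :=
  if n < 10 then [Nat.digitChar n]
  else rep (n / 10) ++ [Nat.digitChar (n % 10)]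
  decreasing_by omega

lemma mref_pos (n : Nat) (hn : n ≠ 0) : mref n = max (n % 10) (mref (n / 10)) := by
  rw [mref, if_neg hn]

lemma rep_ge (n : Nat) (hn : ¬ n < 10) :
    rep n = rep (n / 10) ++ [Nat.digitChar (n % 10)] := by
  rw [rep, if_neg hn]

lemma toDigitsCore_eq_rep : ∀ (f n : Nat) (acc : List Char), n < f →
    Nat.toDigitsCore 10 f n acc = rep n ++ acc := by
  intro f
  induction f with
  | zero => omega
  | succ f ih =>
    intro n acc hn
    simp only [Nat.toDigitsCore]
    by_cases h : n / 10 = 0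
    · rw [if_pos h, rep, if_pos (by omega)]
      simp [Nat.mod_eq_of_lt (by omega : n < 10)]
    · rw [if_neg h, ih (n / 10) _ (by omega), rep_ge n (by omega)]
      simp

lemma toDigits_eq_rep (n : Nat) : Nat.toDigits 10 n = rep n := by
  simpa using toDigitsCore_eq_rep (n + 1) n [] (by omega)

lemma digitVal_digitChar (d : Nat) (hd : d < 10) :
    digitVal (Nat.digitChar d) = (d : Int) := by
  interval_cases d <;> decide

lemma innerA_cast (n : Nat) : ∀ mx : Int, 0 ≤ mx →
    innerA (n : Int) mx = max mx (mref n : Int) := by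
  induction n using Nat.strong_induction_on with
  | _ n ih =>
    intro mx hmx
    rw [innerA]
    by_cases h : 0 < (n : Int)
    · have hn0 : n ≠ 0 := by omega
      rw [dif_pos h]
      have h10 : ((10:Nat) : Int) = (10:Int) := by norm_num
      have hfd : PySem.Int.floordiv (n : Int) 10 = ((n / 10 : Nat) : Int) := by
        simpa [h10] using PySem.Int.floordiv_natCast n 10
      have hmd : PySem.Int.mod (n : Int) 10 = ((n % 10 : Nat) : Int) := by
        simpa [h10] using PySem.Int.mod_natCast n 10
      rw [hfd, hmd]
      rw [ih (n / 10) (by omega) _ (by split_ifs <;> omega)]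
      rw [mref_pos n hn0]
      push_cast
      split_ifs <;> omega
    · rw [dif_neg h, mref, if_pos (by omega)]
      simp
      omega

lemma max?_append_singleton {xs : List Int} {m a : Int} (h : xs.max? = some m) :
    (xs ++ [a]).max? = some (max m a) := by
  induction xs generalizing m with
  | nil => simp at h
  | cons x xs ih =>
    cases hx : xs.max? with
    | none =>
      have : xs = [] := by cases xs <;> simp_all [List.max?]
      subst this
      simp [List.max?] at h ⊢
      simp [← h]
    | some m' =>
      have hm : m = max x m' := by
        rw [List.max?_cons, hx] at h
        simpa using h.symm
      rw [List.cons_append, List.max?_cons, ih hx]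
      simp [hm, max_assoc]

lemma max?_rep (n : Nat) (hn : 0 < n) :
    ((rep n).map digitVal).max? = some ((mref n : Nat) : Int) := by
  induction n using Nat.strong_induction_on with
  | _ n ih =>
    rw [rep]
    by_cases h : n < 10
    · rw [if_pos h]
      rw [mref_pos n (by omega)]
      have h0 : n / 10 = 0 := by omega
      rw [h0, mref]
      simp [digitVal_digitChar n h, Nat.mod_eq_of_lt h]
    · rw [if_neg h]
      rw [List.map_append, List.map_singleton,
        max?_append_singleton (ih (n / 10) (by omega) (by omega)),
        digitVal_digitChar (n % 10) (by omega)]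
      rw [mref_pos n (by omega)]
      simp only [Option.some.injEq]
      push_cast
      omega

lemma maxDigitOf_eq (i : Int) (hi : 0 < i) :
    maxDigitOf i = ((mref i.toNat : Nat) : Int) := by
  unfold maxDigitOf
  have h1 : PySem.Int.toChars i = Nat.toDigits 10 i.toNat := by
    simp [PySem.Int.toChars]
    omega
  rw [h1, toDigits_eq_rep, max?_rep i.toNat (by omega)]
  rfl

lemma foldl_eq_sum (li : List Int) : ∀ res : Int,
    li.foldl (fun res i => res + innerA i 0) res
      = res + ((li.filter (fun i => decide (0 < i))).map maxDigitOf).sum := by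
  induction li with
  | nil => simp
  | cons x xs ih =>
    intro res
    by_cases h : 0 < x
    · obtain ⟨n, rfl⟩ : ∃ n : Nat, x = (n : Int) := ⟨x.toNat, by omega⟩
      have hv : innerA ((n : Nat) : Int) 0 = maxDigitOf (n : Int) := by
        rw [maxDigitOf_eq _ h, innerA_cast n 0 le_rfl]
        simp
      have hn : 0 < n := by exact_mod_cast h
      simp [List.foldl_cons, ih, hv, List.filter_cons, hn, add_assoc]
    · have hv : innerA x 0 = 0 := by rw [innerA, dif_neg (by omega)]
      simp [List.foldl_cons, ih, hv, List.filter_cons, h]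

-- ===== VERDICT (by name: the statement is the Claim_ definition above) =====
theorem maxDigSum_spec : Claim_equal_maxDigSum := by
  intro li _
  unfold Spec_maxDigSum maxDigSum maxDigSum_alt
  simpa using foldl_eq_sum li 0
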